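-- pv_equiv track=rewrite | github.com/sucheol9773/aqts | scripts/generate_diagrams.py | render_overall_dot
-- ===== SOURCE A (Python) =====
-- TEAM_LABELS: dict[int, str] = {
--     0: "공유 — Shared",
--     1: "팀 1 — Strategy / Backtest",
--     2: "팀 2 — Scheduler / Ops / Notification",
--     3: "팀 3 — API / RBAC / Security",
--     4: "팀 4 — Tests / Doc-Sync",
-- }
--
-- def short_label(module: str) -> str:
--     parts = module.split(".")
--     if len(parts) <= 2:
--         return ".".join(parts)
--     return ".".join(parts[-2:])
--
-- TEAM_DOT_COLORS: dict[int, tuple[str, str]] = {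
--     0: ("#ffffff", "#333333"),
--     1: ("#cfe8f3", "#0b88c2"),
--     2: ("#ffe6cc", "#f08000"),
--     3: ("#d4f0d0", "#0a8a0a"),
--     4: ("#dddddd", "#666666"),
-- }
--
-- def _dot_escape(text: str) -> str:
--     """DOT 식별자 내부의 큰따옴표 이스케이프."""
--     return text.replace("\\", "\\\\").replace('"', '\\"')
--
-- def render_overall_dot(
--     all_modules: set[str],
--     edges_list: list[tuple[str, str]],
--     teams: dict[str, int],
-- ) -> str:
--     """build_graph() 결과를 Graphviz DOT 소스로 직렬화.
--
--     팀별 cluster subgraph 를 만들고, 각 노드에 팀 색상을 인라인 속성으로 부여.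
--     엣지는 lexical 정렬하여 결정적 출력을 보장.
--     """
--     lines: list[str] = [
--         "// AUTO-GENERATED by scripts/generate_diagrams.py. 수동 편집 금지.",
--         "// 재생성: python scripts/generate_diagrams.py",
--         "digraph backend_modules {",
--         '    graph [rankdir=LR, compound=true, fontname="Helvetica", fontsize=10];',
--         '    node [shape=box, style="rounded,filled", fontname="Helvetica", fontsize=9];',
--         '    edge [color="#888888", arrowsize=0.6];',
--     ]
--     # 팀별 클러스터 배치 — 노드 lexical 정렬로 결정성 확보.
--     teams_present = sorted({teams[m] for m in all_modules})
--     for team_number in teams_present: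
--         members = sorted(m for m in all_modules if teams[m] == team_number)
--         if not members:
--             continue
--         fill, stroke = TEAM_DOT_COLORS.get(team_number, ("#ffffff", "#333333"))
--         label = TEAM_LABELS.get(team_number, f"team {team_number}")
--         lines.append(f"    subgraph cluster_team{team_number} {{")
--         lines.append(f'        label="{_dot_escape(label)}";')
--         lines.append(f'        style="rounded,filled"; fillcolor="{fill}33";')
--         lines.append(f'        color="{stroke}";')
--         for m in members:
--             lines.append(
--                 f'        "{_dot_escape(m)}" '
--                 f'[label="{_dot_escape(short_label(m))}", '
--                 f'fillcolor="{fill}", color="{stroke}"];'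
--             )
--         lines.append("    }")
--     for src, dst in edges_list:
--         lines.append(f'    "{_dot_escape(src)}" -> "{_dot_escape(dst)}";')
--     lines.append("}")
--     return "\n".join(lines) + "\n"
-- ===== SOURCE B (Python) =====
-- TEAM_LABELS: dict[int, str] = {
--     0: "공유 — Shared",
--     1: "팀 1 — Strategy / Backtest",
--     2: "팀 2 — Scheduler / Ops / Notification",
--     3: "팀 3 — API / RBAC / Security",
--     4: "팀 4 — Tests / Doc-Sync",
-- }
--
-- TEAM_DOT_COLORS: dict[int, tuple[str, str]] = {
--     0: ("#ffffff", "#333333"),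
--     1: ("#cfe8f3", "#0b88c2"),
--     2: ("#ffe6cc", "#f08000"),
--     3: ("#d4f0d0", "#0a8a0a"),
--     4: ("#dddddd", "#666666"),
-- }
--
-- def short_label(module: str) -> str:
--     parts = module.split(".")
--     if len(parts) <= 2:
--         return ".".join(parts)
--     return ".".join(parts[-2:])
--
-- def _dot_escape(text: str) -> str:
--     return text.replace("\\", "\\\\").replace('"', '\\"')
--
-- _HEADER = [
--     "// AUTO-GENERATED by scripts/generate_diagrams.py. 수동 편집 금지.",
--     "// 재생성: python scripts/generate_diagrams.py",
--     "digraph backend_modules {",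
--     '    graph [rankdir=LR, compound=true, fontname="Helvetica", fontsize=10];',
--     '    node [shape=box, style="rounded,filled", fontname="Helvetica", fontsize=9];',
--     '    edge [color="#888888", arrowsize=0.6];',
-- ]
--
-- def _cluster_lines(team_number: int, members: list[str]) -> list[str]:
--     fill, stroke = TEAM_DOT_COLORS.get(team_number, ("#ffffff", "#333333"))
--     label = TEAM_LABELS.get(team_number, f"team {team_number}")
--     out = [
--         f"    subgraph cluster_team{team_number} {{",
--         f'        label="{_dot_escape(label)}";',
--         f'        style="rounded,filled"; fillcolor="{fill}33";',
--         f'        color="{stroke}";',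
--     ]
--     for m in sorted(members):
--         out.append(
--             f'        "{_dot_escape(m)}" '
--             f'[label="{_dot_escape(short_label(m))}", '
--             f'fillcolor="{fill}", color="{stroke}"];'
--         )
--     out.append("    }")
--     return out
--
-- def render_overall_dot(
--     all_modules: set[str],
--     edges_list: list[tuple[str, str]],
--     teams: dict[str, int],
-- ) -> str:
--     # One grouping pass instead of one full scan of all_modules per team.
--     groups: dict[int, list[str]] = {}
--     for m in all_modules:
--         groups.setdefault(teams[m], []).append(m)
--     lines = list(_HEADER)
--     for team_number in sorted(groups):
--         lines.extend(_cluster_lines(team_number, groups[team_number]))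
--     lines.extend(f'    "{_dot_escape(s)}" -> "{_dot_escape(d)}";' for s, d in edges_list)
--     lines.append("}")
--     return "\n".join(lines) + "\n"
-- ===== Notes on version B (the rewrite author's own statement) =====
-- stated objective: faster
-- what changed: B builds a team->members dict in one setdefault-append pass over all_modules and iterates its sorted keys, instead of A's full rescan of all_modules for every team present.
import Mathlib
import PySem

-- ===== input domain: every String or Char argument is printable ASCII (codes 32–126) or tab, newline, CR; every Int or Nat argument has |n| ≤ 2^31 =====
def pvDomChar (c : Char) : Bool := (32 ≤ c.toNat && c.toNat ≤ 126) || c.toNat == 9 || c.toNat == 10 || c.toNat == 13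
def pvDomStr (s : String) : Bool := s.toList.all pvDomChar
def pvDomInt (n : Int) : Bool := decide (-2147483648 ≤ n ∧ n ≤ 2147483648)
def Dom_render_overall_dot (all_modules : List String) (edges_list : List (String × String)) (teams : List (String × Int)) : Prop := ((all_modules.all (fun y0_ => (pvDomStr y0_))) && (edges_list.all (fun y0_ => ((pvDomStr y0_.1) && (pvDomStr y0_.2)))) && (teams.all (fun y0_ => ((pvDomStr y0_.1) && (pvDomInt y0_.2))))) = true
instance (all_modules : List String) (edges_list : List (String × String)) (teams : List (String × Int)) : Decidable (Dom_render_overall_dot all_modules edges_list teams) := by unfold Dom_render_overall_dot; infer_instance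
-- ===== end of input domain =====

-- B replaces A's per-team rescan of all_modules with a single setdefault-append grouping pass
-- into a dict, then iterates the sorted group keys (objective: one pass instead of |teams|·|modules|).

-- shared module-level helpers of both Pythons (_dot_escape, short_label, and the two constant dicts)
def dotEscape (s : String) : String :=
  PySem.Str.replace (PySem.Str.replace s "\\" "\\\\") "\"" "\\\""

def shortLabel (m : String) : String :=
  -- s.split(".") with nonempty sep: Str.split? is some here; getD only totalizes
  let parts := (PySem.Str.split? m ".").getD []
  if parts.length ≤ 2 then PySem.Str.join "." parts
  else PySem.Str.join "." (PySem.List.slice parts (some (-2)) none)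

-- TEAM_DOT_COLORS.get(t, ("#ffffff", "#333333")) — constant dict lookup, exact as a case split
def teamColors (t : Int) : String × String :=
  if t = 0 then ("#ffffff", "#333333")
  else if t = 1 then ("#cfe8f3", "#0b88c2")
  else if t = 2 then ("#ffe6cc", "#f08000")
  else if t = 3 then ("#d4f0d0", "#0a8a0a")
  else if t = 4 then ("#dddddd", "#666666")
  else ("#ffffff", "#333333")

-- TEAM_LABELS.get(t, f"team {t}") — constant dict lookup, exact as a case split
def teamLabel (t : Int) : String :=
  if t = 0 then "공유 — Shared"
  else if t = 1 then "팀 1 — Strategy / Backtest"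
  else if t = 2 then "팀 2 — Scheduler / Ops / Notification"
  else if t = 3 then "팀 3 — API / RBAC / Security"
  else if t = 4 then "팀 4 — Tests / Doc-Sync"
  else "team " ++ PySem.Int.toStr t

-- teams[m]; total stand-in (KeyError inputs are excluded by Pre_render_overall_dot)
def teamOf (teams : List (String × Int)) (m : String) : Int :=
  (List.lookup m teams).getD 0

def nodeLine (fill stroke m : String) : String :=
  "        \"" ++ dotEscape m ++ "\" [label=\"" ++ dotEscape (shortLabel m)
    ++ "\", fillcolor=\"" ++ fill ++ "\", color=\"" ++ stroke ++ "\"];"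

def edgeLine (e : String × String) : String :=
  "    \"" ++ dotEscape e.1 ++ "\" -> \"" ++ dotEscape e.2 ++ "\";"

-- ===== PORT A =====
def render_overall_dot (all_modules : List String) (edges_list : List (String × String)) (teams : List (String × Int)) : String :=
  let lines : List String := [
    "// AUTO-GENERATED by scripts/generate_diagrams.py. 수동 편집 금지.",
    "// 재생성: python scripts/generate_diagrams.py",
    "digraph backend_modules {",
    "    graph [rankdir=LR, compound=true, fontname=\"Helvetica\", fontsize=10];",
    "    node [shape=box, style=\"rounded,filled\", fontname=\"Helvetica\", fontsize=9];",
    "    edge [color=\"#888888\", arrowsize=0.6];"]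
  let teams_present : List Int :=
    PySem.List.sorted (PySem.Set.ofList (all_modules.map (fun m => teamOf teams m))) (fun x => x) false
  let lines := teams_present.foldl (fun acc t =>
    let members := PySem.List.sorted (all_modules.filter (fun m => teamOf teams m == t)) (fun x => x) false
    if members = [] then acc
    else
      let fs := teamColors t
      let label := teamLabel t
      let acc := acc ++ ["    subgraph cluster_team" ++ PySem.Int.toStr t ++ " {"]
      let acc := acc ++ ["        label=\"" ++ dotEscape label ++ "\";"]
      let acc := acc ++ ["        style=\"rounded,filled\"; fillcolor=\"" ++ fs.1 ++ "33\";"]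
      let acc := acc ++ ["        color=\"" ++ fs.2 ++ "\";"]
      let acc := members.foldl (fun acc m => acc ++ [nodeLine fs.1 fs.2 m]) acc
      acc ++ ["    }"]) lines
  let lines := edges_list.foldl (fun acc e => acc ++ [edgeLine e]) lines
  PySem.Str.join "\n" (lines ++ ["}"]) ++ "\n"

-- ===== PORT B =====
def headerLines : List String := [
  "// AUTO-GENERATED by scripts/generate_diagrams.py. 수동 편집 금지.",
  "// 재생성: python scripts/generate_diagrams.py",
  "digraph backend_modules {",
  "    graph [rankdir=LR, compound=true, fontname=\"Helvetica\", fontsize=10];",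
  "    node [shape=box, style=\"rounded,filled\", fontname=\"Helvetica\", fontsize=9];",
  "    edge [color=\"#888888\", arrowsize=0.6];"]

def clusterLines (t : Int) (members : List String) : List String :=
  let fs := teamColors t
  let label := teamLabel t
  let out : List String := [
    "    subgraph cluster_team" ++ PySem.Int.toStr t ++ " {",
    "        label=\"" ++ dotEscape label ++ "\";",
    "        style=\"rounded,filled\"; fillcolor=\"" ++ fs.1 ++ "33\";",
    "        color=\"" ++ fs.2 ++ "\";"]
  let out := (PySem.List.sorted members (fun x => x) false).foldl
    (fun out m => out ++ [nodeLine fs.1 fs.2 m]) out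
  out ++ ["    }"]

def render_overall_dot_alt (all_modules : List String) (edges_list : List (String × String)) (teams : List (String × Int)) : String :=
  let groups : PySem.Dict Int (List String) :=
    all_modules.foldl (fun d m => d.modify (teamOf teams m) [] (fun xs => xs ++ [m])) PySem.Dict.empty
  let lines := (PySem.List.sorted groups.keys (fun x => x) false).foldl
    (fun acc t => acc ++ clusterLines t (groups.getD t [])) headerLines
  let lines := lines ++ edges_list.map edgeLine
  let lines := lines ++ ["}"]
  PySem.Str.join "\n" lines ++ "\n"

-- ===== PRECONDITION & SPEC =====
-- Pre_ excludes exactly the inputs where Python A raises KeyError: a module of all_modules missing from teams.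
def Pre_render_overall_dot (all_modules : List String) (edges_list : List (String × String)) (teams : List (String × Int)) : Prop :=
  ∀ m ∈ all_modules, (List.lookup m teams).isSome = true
instance (all_modules : List String) (edges_list : List (String × String)) (teams : List (String × Int)) : Decidable (Pre_render_overall_dot all_modules edges_list teams) := by unfold Pre_render_overall_dot; infer_instance

def pvWitness_render_overall_dot : List String × (List (String × String)) × (List (String × Int)) :=
  (["pkg.a", "pkg.b"], [("pkg.a", "pkg.b")], [("pkg.a", 1), ("pkg.b", 7)])

def Spec_render_overall_dot (all_modules : List String) (edges_list : List (String × String)) (teams : List (String × Int)) (out : String) : Prop := out = render_overall_dot_alt all_modules edges_list teams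
instance (all_modules : List String) (edges_list : List (String × String)) (teams : List (String × Int)) (out : String) : Decidable (Spec_render_overall_dot all_modules edges_list teams out) := by unfold Spec_render_overall_dot; infer_instance

-- ===== CLAIM (what is proved, stated in full; the proofs are below) =====
def Claim_equal_render_overall_dot : Prop := ∀ (all_modules : List String) (edges_list : List (String × String)) (teams : List (String × Int)), Dom_render_overall_dot all_modules edges_list teams → Pre_render_overall_dot all_modules edges_list teams → Spec_render_overall_dot all_modules edges_list teams (render_overall_dot all_modules edges_list teams)

-- ===== LEMMAS AND PROOFS =====

-- B's groups dict: its keys are the distinct team numbers, its entry at t is the filtered module list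
theorem groups_keys (all_modules : List String) (teams : List (String × Int)) :
    (all_modules.foldl (fun d m => d.modify (teamOf teams m) [] (fun xs => xs ++ [m])) PySem.Dict.empty).keys
      = PySem.Set.ofList (all_modules.map (fun m => teamOf teams m)) := by
  rw [PySem.Dict.keys_foldl_modify_key]
  rfl

theorem groups_getD (all_modules : List String) (teams : List (String × Int)) (t : Int) :
    (all_modules.foldl (fun d m => d.modify (teamOf teams m) [] (fun xs => xs ++ [m])) PySem.Dict.empty).getD t []
      = all_modules.filter (fun m => teamOf teams m == t) := by
  have h : all_modules.foldl (fun d m => d.modify (teamOf teams m) [] (fun xs => xs ++ [m])) PySem.Dict.empty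
      = (all_modules.map (fun m => (teamOf teams m, m))).foldl
          (fun d p => d.modify p.1 [] (fun xs => xs ++ [p.2])) PySem.Dict.empty := by
    rw [List.foldl_map]
  rw [h, PySem.Dict.getD_foldl_modify_append]
  simp [List.filter_map, Function.comp_def]

-- ===== VERDICT (by name: the statement is the Claim_ definition above) =====
theorem render_overall_dot_spec : Claim_equal_render_overall_dot := by
  intro all_modules edges_list teams _ _
  unfold Spec_render_overall_dot
  simp only [render_overall_dot, render_overall_dot_alt, headerLines]
  rw [groups_keys, PySem.List.foldl_append_singleton_eq_map]
  have hfold :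
      List.foldl (fun acc t =>
        let members := PySem.List.sorted (all_modules.filter (fun m => teamOf teams m == t)) (fun x => x) false
        if members = [] then acc
        else
          List.foldl (fun acc m => acc ++ [nodeLine (teamColors t).1 (teamColors t).2 m])
            (acc ++ ["    subgraph cluster_team" ++ PySem.Int.toStr t ++ " {"]
              ++ ["        label=\"" ++ dotEscape (teamLabel t) ++ "\";"]
              ++ ["        style=\"rounded,filled\"; fillcolor=\"" ++ (teamColors t).1 ++ "33\";"]
              ++ ["        color=\"" ++ (teamColors t).2 ++ "\";"]) members ++ ["    }"])
        ["// AUTO-GENERATED by scripts/generate_diagrams.py. 수동 편집 금지.", "// 재생성: python scripts/generate_diagrams.py",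
          "digraph backend_modules {", "    graph [rankdir=LR, compound=true, fontname=\"Helvetica\", fontsize=10];",
          "    node [shape=box, style=\"rounded,filled\", fontname=\"Helvetica\", fontsize=9];",
          "    edge [color=\"#888888\", arrowsize=0.6];"]
        (PySem.List.sorted (PySem.Set.ofList (all_modules.map (fun m => teamOf teams m))) (fun x => x) false)
      = List.foldl (fun acc t => acc ++ clusterLines t
          ((all_modules.foldl (fun d m => d.modify (teamOf teams m) [] (fun xs => xs ++ [m])) PySem.Dict.empty).getD t []))
        ["// AUTO-GENERATED by scripts/generate_diagrams.py. 수동 편집 금지.", "// 재생성: python scripts/generate_diagrams.py",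
          "digraph backend_modules {", "    graph [rankdir=LR, compound=true, fontname=\"Helvetica\", fontsize=10];",
          "    node [shape=box, style=\"rounded,filled\", fontname=\"Helvetica\", fontsize=9];",
          "    edge [color=\"#888888\", arrowsize=0.6];"]
        (PySem.List.sorted (PySem.Set.ofList (all_modules.map (fun m => teamOf teams m))) (fun x => x) false) := by
    apply PySem.List.foldl_congr_mem
    intro acc t ht
    rw [groups_getD]
    have hmem : t ∈ all_modules.map (fun m => teamOf teams m) := by
      rw [PySem.List.mem_sorted] at ht
      exact (PySem.Set.mem_ofList _ _).mp ht
    obtain ⟨m, hm, hteq⟩ := List.mem_map.mp hmem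
    have hne : all_modules.filter (fun m => teamOf teams m == t) ≠ [] := by
      intro hnil
      have : m ∈ all_modules.filter (fun m => teamOf teams m == t) :=
        List.mem_filter.mpr ⟨hm, by simp [hteq]⟩
      simp [hnil] at this
    have hsne : PySem.List.sorted (all_modules.filter (fun m => teamOf teams m == t)) (fun x => x) false ≠ [] := by
      rw [Ne, PySem.List.sorted_eq_nil_iff]
      exact hne
    simp only [if_neg hsne, clusterLines]
    rw [PySem.List.foldl_append_singleton_eq_map, PySem.List.foldl_append_singleton_eq_map]
    simp
  rw [hfold]
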